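-- pv_equiv track=rewrite | github.com/Anspar-Org/elspais | src/elspais/graph/parsers/lark/transformers/reference.py | _is_empty_comment
-- ===== SOURCE A (Python) =====
-- _COMMENT_STYLES = ["#", "//", "--"]
--
-- def _is_empty_comment(text: str) -> bool:
--     """Check if a line is an empty comment."""
--     stripped = text.strip()
--     for style in _COMMENT_STYLES:
--         if stripped.startswith(style):
--             remainder = stripped[len(style) :].strip().rstrip("#/-").strip()
--             if not remainder:
--                 return True
--     return False
-- ===== SOURCE B (Python) =====
-- def _is_empty_comment(text: str) -> bool:
--     """Check if a line is an empty comment.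
--
--     Single left-to-right scan: optional whitespace, a comment marker (hash or a
--     doubled slash/dash), optional whitespace, a run of comment-marker characters,
--     optional trailing whitespace, end of line.
--     """
--     i, n = 0, len(text)
--     while i < n and text[i].isspace():
--         i += 1
--     if i < n and text[i] == '#':
--         i += 1
--     elif i + 1 < n and text[i] == text[i + 1] and text[i] in '/-':
--         i += 2
--     else:
--         return False
--     while i < n and text[i].isspace():
--         i += 1
--     while i < n and text[i] in '#/-':
--         i += 1
--     while i < n and text[i].isspace():
--         i += 1
--     return i == n
-- ===== Notes on version B (the rewrite author's own statement) =====
-- stated objective: alternative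
-- what changed: Replaces A's loop over comment styles, each re-deriving a remainder via a strip / rstrip-comment-chars / strip pipeline on fresh string copies, by a single left-to-right index scan that matches the line against the language optional whitespace, a comment marker, optional whitespace, a run of comment-marker characters, optional trailing whitespace with no slicing or strip calls at all.
import Mathlib
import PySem

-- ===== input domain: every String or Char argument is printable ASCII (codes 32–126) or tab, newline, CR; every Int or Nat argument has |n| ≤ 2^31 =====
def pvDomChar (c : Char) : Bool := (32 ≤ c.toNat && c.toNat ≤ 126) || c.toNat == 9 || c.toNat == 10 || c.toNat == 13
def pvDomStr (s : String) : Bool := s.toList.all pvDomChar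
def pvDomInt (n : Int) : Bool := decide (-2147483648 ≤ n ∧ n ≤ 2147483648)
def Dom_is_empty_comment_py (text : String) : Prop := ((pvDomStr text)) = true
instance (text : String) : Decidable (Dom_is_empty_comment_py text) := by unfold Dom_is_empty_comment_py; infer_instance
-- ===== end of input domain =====

-- B replaces A's loop over comment styles (a strip / rstrip-comment-chars / strip pipeline per style) by a
-- single left-to-right scan: whitespace, a comment marker, whitespace, a run of comment-marker
-- characters, trailing whitespace (objective: alternative).


-- ===== PORT A =====
-- _COMMENT_STYLES = ["#", "//", "--"]
def pvCommentStyles : List (List Char) := [['#'], ['/', '/'], ['-', '-']]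

-- s.rstrip("#/-"): hand-port (PySem has no rstrip-with-chars argument); exact: Python
-- drops the longest trailing run of characters of "#/-", i.e. dropWhile membership on the reverse.
def pvRstripCM (s : List Char) : List Char :=
  (List.dropWhile (fun c => ['#', '/', '-'].contains c) s.reverse).reverse

-- stripped[len(style):].strip().rstrip("#/-").strip()
def pvRemainderA (stripped : List Char) (style : List Char) : List Char :=
  PySem.Chars.strip (pvRstripCM (PySem.Chars.strip
    (PySem.List.slice stripped (some (style.length : Int)) none)))

-- the 'for style in _COMMENT_STYLES' loop: 'if not remainder: return True', else next style
def pvLoopA (stripped : List Char) : List (List Char) → Bool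
  | [] => false
  | style :: rest =>
      if PySem.Chars.startswith stripped style then
        if (pvRemainderA stripped style).isEmpty then true
        else pvLoopA stripped rest
      else pvLoopA stripped rest

def is_empty_comment_py (text : String) : Bool :=
  pvLoopA (PySem.Chars.strip text.toList) pvCommentStyles

-- ===== PORT B =====
-- c in '#/-'
def pvCB (c : Char) : Bool := c = '#' || c = '/' || c = '-'

-- the three trailing while-loops of the scan: while isspace; while in '#/-'; while isspace;
-- each 'while i < n and P(text[i]): i += 1' is List.dropWhile on the remaining characters
def pvTailB (r : List Char) : Bool :=
  (((r.dropWhile PySem.Chars.isspace).dropWhile pvCB).dropWhile PySem.Chars.isspace).isEmpty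

def is_empty_comment_py_alt (text : String) : Bool :=
  -- leading 'while isspace' loop, then the prefix dispatch on the next one or two characters
  match text.toList.dropWhile PySem.Chars.isspace with
  | [] => false
  | a :: rest =>
      if a = '#' then pvTailB rest                      -- text[i] == '#'
      else
        match rest with
        | [] => false                                    -- i + 1 < n fails
        | b :: rest2 =>
            if a = b && (a = '/' || a = '-') then pvTailB rest2   -- text[i]==text[i+1] and text[i] in '/-'
            else false

-- ===== PRECONDITION & SPEC =====
def Spec_is_empty_comment_py (text : String) (out : Bool) : Prop := out = is_empty_comment_py_alt text
instance (text : String) (out : Bool) : Decidable (Spec_is_empty_comment_py text out) := by unfold Spec_is_empty_comment_py; infer_instance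

-- ===== CLAIM (what is proved, stated in full; the proofs are below) =====
def Claim_equal_is_empty_comment_py : Prop := ∀ (text : String), Dom_is_empty_comment_py text → Spec_is_empty_comment_py text (is_empty_comment_py text)

-- ===== LEMMAS AND PROOFS =====

-- any list splits as its rstrip-style prefix plus the dropped trailing run
theorem pv_rev_decomp (p : Char → Bool) (l : List Char) :
    l = (List.dropWhile p l.reverse).reverse ++ (List.takeWhile p l.reverse).reverse := by
  conv_lhs => rw [← l.reverse_reverse]
  conv_lhs => rw [← List.takeWhile_append_dropWhile (p := p) (l := l.reverse)]
  rw [List.reverse_append]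

theorem pv_dropWhile_all_false {p : Char → Bool} {l : List Char}
    (h : ∀ c ∈ l, p c = false) : List.dropWhile p l = l := by
  cases l with
  | nil => rfl
  | cons a t => simp [List.dropWhile, h a (by simp)]

theorem pv_rstrip_cons {c : Char} (hc : PySem.Chars.isspace c = false) (u : List Char) :
    PySem.Chars.rstrip (c :: u) = c :: PySem.Chars.rstrip u := by
  unfold PySem.Chars.rstrip
  rw [List.reverse_cons, List.dropWhile_append]
  by_cases h : (u.reverse.dropWhile PySem.Chars.isspace).isEmpty
  · simp [List.isEmpty_iff.mp h, List.dropWhile, hc]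
  · simp [h]

theorem pv_rstrip_append_ws {w : List Char} (hw : ∀ c ∈ w, PySem.Chars.isspace c = true)
    (a : List Char) : PySem.Chars.rstrip (a ++ w) = PySem.Chars.rstrip a := by
  unfold PySem.Chars.rstrip
  rw [List.reverse_append, List.dropWhile_append]
  have : List.dropWhile PySem.Chars.isspace w.reverse = [] :=
    List.dropWhile_eq_nil_iff.mpr (fun c hc => hw c (List.mem_reverse.mp hc))
  simp [this]

theorem pv_rstrip_nows {a : List Char} (h : ∀ c ∈ a, PySem.Chars.isspace c = false) :
    PySem.Chars.rstrip a = a := by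
  unfold PySem.Chars.rstrip
  rw [pv_dropWhile_all_false (fun c hc => h c (List.mem_reverse.mp hc)), List.reverse_reverse]

-- comment characters are not whitespace
theorem pv_disj {c : Char} (h : pvCB c = true) : PySem.Chars.isspace c = false := by
  unfold pvCB at h
  rcases Bool.or_eq_true_iff.mp h with h | h
  · rcases Bool.or_eq_true_iff.mp h with h | h <;>
      · rw [decide_eq_true_iff.mp h]; decide
  · rw [decide_eq_true_iff.mp h]; decide

-- strip ignores an rstrip already applied
theorem pv_rstrip_decomp (u : List Char) :
    u = PySem.Chars.rstrip u ++ (List.takeWhile PySem.Chars.isspace u.reverse).reverse :=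
  pv_rev_decomp PySem.Chars.isspace u

theorem pv_strip_append_ws {w : List Char} (hw : ∀ c ∈ w, PySem.Chars.isspace c = true)
    (a : List Char) : PySem.Chars.strip (a ++ w) = PySem.Chars.strip a := by
  show PySem.Chars.rstrip (PySem.Chars.lstrip _) = PySem.Chars.rstrip (PySem.Chars.lstrip a)
  unfold PySem.Chars.lstrip
  rw [List.dropWhile_append]
  by_cases h : (a.dropWhile PySem.Chars.isspace).isEmpty
  · rw [if_pos h, List.isEmpty_iff.mp h, List.dropWhile_eq_nil_iff.mpr hw]
  · rw [if_neg h]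
    exact pv_rstrip_append_ws hw _

theorem pv_strip_rstrip (u : List Char) :
    PySem.Chars.strip (PySem.Chars.rstrip u) = PySem.Chars.strip u := by
  conv_rhs => rw [pv_rstrip_decomp u]
  exact (pv_strip_append_ws
    (fun c hc => List.mem_takeWhile_imp (List.mem_reverse.mp hc)) _).symm

-- B's three trailing loops decide emptiness of A's stripped remainder:
-- ws*-then-C*-then-ws* consumes everything iff the stripped body is all comment chars
theorem pv_greedy (r : List Char) :
    pvTailB r = (PySem.Chars.strip r).all pvCB := by
  unfold pvTailB
  set u := r.dropWhile PySem.Chars.isspace with hu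
  have hstrip : PySem.Chars.strip r = PySem.Chars.rstrip u := rfl
  rw [hstrip, Bool.eq_iff_iff, List.isEmpty_iff, List.dropWhile_eq_nil_iff, List.all_eq_true]
  constructor
  · intro h c hc
    -- u = takeWhile pvCB u ++ dropWhile pvCB u, and the drop part is all-ws
    have hsplit := (List.takeWhile_append_dropWhile (p := pvCB) (l := u)).symm
    have hwsdrop : ∀ c ∈ u.dropWhile pvCB, PySem.Chars.isspace c = true := h
    have hre : PySem.Chars.rstrip u = List.takeWhile pvCB u := by
      conv_lhs => rw [hsplit]
      rw [pv_rstrip_append_ws hwsdrop]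
      exact pv_rstrip_nows (fun c hc => pv_disj (List.mem_takeWhile_imp hc))
    rw [hre] at hc
    exact List.mem_takeWhile_imp hc
  · intro h c hc
    -- rstrip u is all-C; u = rstrip u ++ ws-run, so dropWhile pvCB u leaves only the ws-run
    have hdec := pv_rev_decomp PySem.Chars.isspace u
    have hw : ∀ x ∈ (List.takeWhile PySem.Chars.isspace u.reverse).reverse,
        PySem.Chars.isspace x = true :=
      fun x hx => List.mem_takeWhile_imp (List.mem_reverse.mp hx)
    have hC : ∀ x ∈ PySem.Chars.rstrip u, pvCB x = true := h
    have hdw : u.dropWhile pvCB = (List.takeWhile PySem.Chars.isspace u.reverse).reverse := by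
      conv_lhs => rw [pv_rstrip_decomp u]
      rw [List.dropWhile_append, List.dropWhile_eq_nil_iff.mpr hC]
      simp only [List.isEmpty_nil, if_true]
      refine pv_dropWhile_all_false (fun x hx => ?_)
      cases hp : pvCB x
      · rfl
      · have h1 := pv_disj hp
        rw [hw x hx] at h1
        exact absurd h1 (by simp)
    rw [hdw] at hc
    exact hw c hc

-- head of the rstrip of a list is the head of the list (rstrip is a prefix)
theorem pv_rstrip_head {d : Char} {v : List Char} {e : Char} {r : List Char}
    (h : PySem.Chars.rstrip (d :: v) = e :: r) : e = d := by
  have hdec := pv_rev_decomp PySem.Chars.isspace (d :: v)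
  show _
  have hx : d :: v = (e :: r) ++ (List.takeWhile PySem.Chars.isspace (d :: v).reverse).reverse := by
    rw [← h]; exact hdec
  have h2 : d = e := by simpa using congrArg List.head? hx
  exact h2.symm

-- Bool/list conversions between A's '.contains' test and B's pvCB
theorem pv_contains_eq (c : Char) : (['#', '/', '-'].contains c) = pvCB c := by
  rw [Bool.eq_iff_iff]
  unfold pvCB
  simp
  tauto

theorem pv_rstripCM_decomp (s : List Char) :
    s = pvRstripCM s ++ (List.takeWhile (fun c => ['#', '/', '-'].contains c) s.reverse).reverse :=
  pv_rev_decomp _ s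

-- Python strip() gives "" exactly on all-whitespace input
theorem pv_strip_eq_nil_iff (z : List Char) :
    PySem.Chars.strip z = [] ↔ ∀ c ∈ z, PySem.Chars.isspace c = true := by
  unfold PySem.Chars.strip PySem.Chars.rstrip PySem.Chars.lstrip
  rw [List.reverse_eq_nil_iff, List.dropWhile_eq_nil_iff]
  constructor
  · intro h c hc
    have hz := List.takeWhile_append_dropWhile (p := PySem.Chars.isspace) (l := z)
    rw [← hz] at hc
    rcases List.mem_append.mp hc with h1 | h2
    · exact List.mem_takeWhile_imp h1
    · exact h c (List.mem_reverse.mpr h2)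
  · intro h c hc
    exact h c ((List.dropWhile_sublist _).mem (List.mem_reverse.mp hc))

-- the head of a nonempty strip() result is not whitespace
theorem pv_strip_head_not_space (b : List Char) (c : Char)
    (hc : (PySem.Chars.strip b).head? = some c) : PySem.Chars.isspace c = false := by
  unfold PySem.Chars.strip PySem.Chars.rstrip PySem.Chars.lstrip at hc
  set w := List.dropWhile PySem.Chars.isspace b with hw
  set r := (List.dropWhile PySem.Chars.isspace w.reverse).reverse with hr
  have hd : w = r ++ (List.takeWhile PySem.Chars.isspace w.reverse).reverse :=
    pv_rev_decomp _ w
  have hwh : w.head? = some c := by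
    rw [hd, List.head?_append, hc]; rfl
  have hwne : w ≠ [] := by intro h; rw [h] at hwh; simp at hwh
  have := List.head_dropWhile_not PySem.Chars.isspace (l := b) (by rw [← hw]; exact hwne)
  have hcc : c = w.head hwne := by
    rw [List.head?_eq_some_head hwne] at hwh
    exact (Option.some_inj.mp hwh).symm
  rw [hcc]
  exact this

-- A's per-style remainder-emptiness is the all-comment-chars test on the stripped body (key glue)
theorem pv_key (b : List Char) :
    (PySem.Chars.strip (pvRstripCM (PySem.Chars.strip b))).isEmpty
      = (PySem.Chars.strip b).all pvCB := by
  set y := PySem.Chars.strip b with hy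
  rw [Bool.eq_iff_iff, List.isEmpty_iff, List.all_eq_true]
  constructor
  · intro h c hcy
    have hall := (pv_strip_eq_nil_iff _).mp h
    cases hpre : pvRstripCM y with
    | nil =>
        have hdec := pv_rstripCM_decomp y
        rw [hpre, List.nil_append] at hdec
        rw [hdec] at hcy
        rw [← pv_contains_eq]
        exact List.mem_takeWhile_imp (List.mem_reverse.mp hcy)
    | cons e r =>
        have hhead := congrArg List.head? (pv_rstripCM_decomp y)
        rw [hpre] at hhead
        have hy_head : y.head? = some e := by simpa using hhead
        have hs := pv_strip_head_not_space b e (by rw [← hy]; exact hy_head)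
        have hws : PySem.Chars.isspace e = true := hall e (by rw [hpre]; simp)
        rw [hs] at hws
        exact absurd hws (by simp)
  · intro h
    have hnil : pvRstripCM y = [] := by
      unfold pvRstripCM
      rw [List.reverse_eq_nil_iff]
      exact List.dropWhile_eq_nil_iff.mpr
        (fun c hc => by rw [pv_contains_eq]; exact h c (List.mem_reverse.mp hc))
    rw [hnil]
    rfl

theorem pv_rstrip_nil : PySem.Chars.rstrip [] = [] := rfl

-- the head left by dropWhile fails the predicate
theorem pv_dropWhile_head_false {p : Char → Bool} {a : Char} {v : List Char} :
    ∀ {t : List Char}, t.dropWhile p = a :: v → p a = false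
  | [], h => by simp at h
  | c :: ts, h => by
      by_cases hc : p c = true
      · rw [List.dropWhile_cons, if_pos hc] at h
        exact pv_dropWhile_head_false h
      · rw [List.dropWhile_cons, if_neg hc] at h
        injection h with h1 _
        rw [← h1]
        exact eq_false_of_ne_true hc

-- the two ports agree: case analysis on the first non-space characters
theorem pv_main (t : List Char) :
    pvLoopA (PySem.Chars.strip t) pvCommentStyles =
      (match t.dropWhile PySem.Chars.isspace with
       | [] => false
       | a :: rest =>
           if a = '#' then pvTailB rest
           else
             match rest with
             | [] => false
             | b :: rest2 =>
                 if a = b && (a = '/' || a = '-') then pvTailB rest2 else false) := by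
  have hstrip : PySem.Chars.strip t = PySem.Chars.rstrip (t.dropWhile PySem.Chars.isspace) := rfl
  cases hu : t.dropWhile PySem.Chars.isspace with
  | nil =>
      rw [hstrip, hu]
      decide
  | cons a v =>
      have ha : PySem.Chars.isspace a = false := pv_dropWhile_head_false hu
      rw [hstrip, hu, pv_rstrip_cons ha]
      by_cases h1 : a = '#'
      · subst h1
        simp [pvLoopA, pvCommentStyles, pvRemainderA, PySem.Chars.startswith,
          List.isPrefixOf, PySem.List.slice_from_one, pv_strip_rstrip, pv_key, pv_greedy,
          List.all_eq_true]
        rw [Bool.eq_iff_iff, decide_eq_true_iff, List.all_eq_true]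
      · by_cases h2 : a = '/'
        · subst h2
          cases v with
          | nil =>
              simp [pvLoopA, pvCommentStyles, PySem.Chars.startswith, List.isPrefixOf,
                pv_rstrip_nil]
          | cons d v2 =>
              by_cases h3 : d = '/'
              · subst h3
                rw [pv_rstrip_cons (by decide)]
                simp [pvLoopA, pvCommentStyles, pvRemainderA, PySem.Chars.startswith,
                  List.isPrefixOf, PySem.List.slice_from, pv_strip_rstrip, pv_key,
                  pv_greedy, List.all_eq_true]
                rw [Bool.eq_iff_iff, decide_eq_true_iff, List.all_eq_true]
              · have h3' : ('/' = d) = False := eq_false (fun h => h3 h.symm)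
                cases hv : PySem.Chars.rstrip (d :: v2) with
                | nil =>
                    simp [pvLoopA, pvCommentStyles, PySem.Chars.startswith,
                      List.isPrefixOf, h3']
                | cons e r =>
                    have he : e = d := pv_rstrip_head hv
                    subst he
                    simp [pvLoopA, pvCommentStyles, PySem.Chars.startswith,
                      List.isPrefixOf, h3']
        · by_cases h4 : a = '-'
          · subst h4
            cases v with
            | nil =>
                simp [pvLoopA, pvCommentStyles, PySem.Chars.startswith, List.isPrefixOf,
                pv_rstrip_nil]
            | cons d v2 =>
                by_cases h3 : d = '-'
                · subst h3
                  rw [pv_rstrip_cons (by decide)]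
                  simp [pvLoopA, pvCommentStyles, pvRemainderA, PySem.Chars.startswith,
                    List.isPrefixOf, PySem.List.slice_from, pv_strip_rstrip, pv_key,
                    pv_greedy, List.all_eq_true]
                  rw [Bool.eq_iff_iff, decide_eq_true_iff, List.all_eq_true]
                · have h3' : ('-' = d) = False := eq_false (fun h => h3 h.symm)
                  cases hv : PySem.Chars.rstrip (d :: v2) with
                  | nil =>
                      simp [pvLoopA, pvCommentStyles, PySem.Chars.startswith,
                        List.isPrefixOf, h3']
                  | cons e r =>
                      have he : e = d := pv_rstrip_head hv
                      subst he
                      simp [pvLoopA, pvCommentStyles, PySem.Chars.startswith,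
                        List.isPrefixOf, h3']
          · have g1 : ('#' = a) = False := eq_false (fun h => h1 h.symm)
            have g2 : ('/' = a) = False := eq_false (fun h => h2 h.symm)
            have g3 : ('-' = a) = False := eq_false (fun h => h4 h.symm)
            cases v with
            | nil =>
                simp [pvLoopA, pvCommentStyles, PySem.Chars.startswith, List.isPrefixOf,
                  g1, g2, g3, h1]
            | cons d v2 =>
                simp [pvLoopA, pvCommentStyles, PySem.Chars.startswith, List.isPrefixOf,
                  g1, g2, g3, h1]
                intro _ h
                rcases h with h | h
                · exact absurd h h2
                · exact absurd h h4

-- ===== VERDICT (by name: the statement is the Claim_ definition above) =====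
theorem is_empty_comment_py_spec : Claim_equal_is_empty_comment_py := by
  intro text _
  unfold Spec_is_empty_comment_py is_empty_comment_py is_empty_comment_py_alt
  exact pv_main text.toList
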